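-- pv_equiv track=rewrite | github.com/KyryloMuzychka/information-security | hamming code/main.py | get_index_where_error
-- ===== SOURCE A (Python) =====
-- def check_bits_included(number, mask):
--     return (number & mask) == mask
--
-- def get_index_where_error(code, indexes_check_bits):
--     binary_code_error_bit = list()
--     for index_element in range(len(code)):
--         if index_element in indexes_check_bits:
--             flag = False
--             for index in range(len(code)):
--                 if check_bits_included(index+1, index_element+1):
--                     if flag:
--                         bit ^= code[index]
--                     else:
--                         flag = True
--                         bit = code[index]
--             binary_code_error_bit.append(bit)
--     binary_code_error_bit.reverse()
--     return binary_code_error_bit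
-- ===== SOURCE B (Python) =====
-- def get_index_where_error(code, indexes_check_bits):
--     n = len(code)
--     # distinct in-range check-bit indices, descending (matches A's append-then-reverse order)
--     cbs = sorted({cb for cb in indexes_check_bits if 0 <= cb < n}, reverse=True)
--     acc = [0] * len(cbs)
--     # one pass over the code, maintaining one XOR accumulator per check bit
--     for i, x in enumerate(code):
--         acc = [a ^ x if (i + 1) & (cb + 1) == cb + 1 else a
--                for a, cb in zip(acc, cbs)]
--     return acc
-- ===== Notes on version B (the rewrite author's own statement) =====
-- stated objective: faster
-- what changed: B inverts A's nested loops: instead of scanning the whole code once per check bit with a flag-controlled first-assignment and a linear membership test per position, B collects the distinct in-range check-bit indices once (sorted descending to match A's append-then-reverse order) and makes one pass over the code maintaining a XOR accumulator per check bit.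
import Mathlib
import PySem

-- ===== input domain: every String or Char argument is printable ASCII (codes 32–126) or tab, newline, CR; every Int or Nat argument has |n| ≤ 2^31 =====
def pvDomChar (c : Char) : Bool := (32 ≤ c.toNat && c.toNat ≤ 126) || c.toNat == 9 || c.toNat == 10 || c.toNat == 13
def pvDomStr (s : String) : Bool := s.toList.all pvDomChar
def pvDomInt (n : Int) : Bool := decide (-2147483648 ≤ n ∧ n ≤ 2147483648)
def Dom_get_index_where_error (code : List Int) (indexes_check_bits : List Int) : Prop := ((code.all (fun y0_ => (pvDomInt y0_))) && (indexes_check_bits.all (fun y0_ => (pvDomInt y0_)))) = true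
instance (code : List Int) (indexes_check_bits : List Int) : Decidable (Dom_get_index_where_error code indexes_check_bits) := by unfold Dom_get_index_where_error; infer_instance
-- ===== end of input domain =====

-- B replaces A's nested scans (outer over check bits, inner flag-controlled scan over the code)
-- by one pass over the code maintaining one XOR accumulator per distinct in-range check bit (alternative decomposition).

-- ===== PORT A =====
def check_bits_included (number : Int) (mask : Int) : Bool :=
  PySem.Int.band number mask == mask

def get_index_where_error (code : List Int) (indexes_check_bits : List Int) : List Int :=
  let n : Int := code.length
  let binary_code_error_bit : List Int :=
    (PySem.List.pyRange 0 n 1).foldl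
      (fun b index_element =>
        if indexes_check_bits.contains index_element then
          -- inner loop state: (flag, bit); bit is always assigned at index = index_element before use
          let st := (PySem.List.pyRange 0 n 1).foldl
            (fun (st : Bool × Int) index =>
              if check_bits_included (index + 1) (index_element + 1) then
                if st.1 then (true, PySem.Int.bxor st.2 (PySem.List.pyGetD code index 0))
                else (true, PySem.List.pyGetD code index 0)  -- index ∈ [0, n): pyGetD is exact here
              else st)
            (false, 0)
          b ++ [st.2]
        else b)
      []
  binary_code_error_bit.reverse

-- ===== PORT B =====
def get_index_where_error_alt (code : List Int) (indexes_check_bits : List Int) : List Int :=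
  let n : Int := code.length
  let cbs : List Int :=
    PySem.List.sorted
      (PySem.Set.ofList (indexes_check_bits.filter (fun cb => decide (0 ≤ cb) && decide (cb < n))))
      (fun x => x) true
  let acc0 : List Int := List.replicate cbs.length 0
  (PySem.List.enumerate code 0).foldl
    (fun acc p =>
      (acc.zip cbs).map (fun q =>
        if PySem.Int.band (p.1 + 1) (q.2 + 1) == q.2 + 1 then PySem.Int.bxor q.1 p.2 else q.1))
    acc0

-- ===== PRECONDITION & SPEC =====
def Spec_get_index_where_error (code : List Int) (indexes_check_bits : List Int) (out : List Int) : Prop := out = get_index_where_error_alt code indexes_check_bits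
instance (code : List Int) (indexes_check_bits : List Int) (out : List Int) : Decidable (Spec_get_index_where_error code indexes_check_bits out) := by unfold Spec_get_index_where_error; infer_instance

-- ===== CLAIM (what is proved, stated in full; the proofs are below) =====
def Claim_equal_get_index_where_error : Prop := ∀ (code : List Int) (indexes_check_bits : List Int), Dom_get_index_where_error code indexes_check_bits → Spec_get_index_where_error code indexes_check_bits (get_index_where_error code indexes_check_bits)

-- ===== LEMMAS AND PROOFS =====

-- the syndrome of one check bit cb: XOR of code values at positions whose 1-based index covers cb+1
def pvSyn (cb : Int) (l : List (Int × Int)) (a : Int) : Int :=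
  l.foldl (fun a p => if PySem.Int.band (p.1 + 1) (cb + 1) == cb + 1 then PySem.Int.bxor a p.2 else a) a

-- A's flag-controlled inner fold computes pvSyn from 0 (0 ^ x = x)
theorem pv_flag_true (cb : Int) (l : List (Int × Int)) (b : Int) :
    (l.foldl
      (fun (st : Bool × Int) p =>
        if PySem.Int.band (p.1 + 1) (cb + 1) == cb + 1 then
          if st.1 then (true, PySem.Int.bxor st.2 p.2) else (true, p.2)
        else st)
      (true, b)).2 = pvSyn cb l b := by
  induction l generalizing b with
  | nil => simp [pvSyn]
  | cons p tl ih =>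
    simp only [List.foldl_cons, pvSyn, if_true]
    by_cases h : PySem.Int.band (p.1 + 1) (cb + 1) == cb + 1
    · simp only [h, if_true]
      exact ih (PySem.Int.bxor b p.2)
    · simp only [h]
      exact ih b

theorem pv_flag_false (cb : Int) (l : List (Int × Int)) :
    (l.foldl
      (fun (st : Bool × Int) p =>
        if PySem.Int.band (p.1 + 1) (cb + 1) == cb + 1 then
          if st.1 then (true, PySem.Int.bxor st.2 p.2) else (true, p.2)
        else st)
      (false, (0 : Int))).2 = pvSyn cb l 0 := by
  induction l with
  | nil => simp [pvSyn]
  | cons p tl ih =>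
    simp only [List.foldl_cons, pvSyn]
    by_cases h : PySem.Int.band (p.1 + 1) (cb + 1) == cb + 1
    · simp only [h, if_true, Bool.false_eq_true, if_false]
      have := pv_flag_true cb tl p.2
      rw [this]
      have h0 : PySem.Int.bxor 0 p.2 = p.2 := by
        rw [PySem.Int.bxor_comm]; exact PySem.Int.bxor_zero p.2
      rw [pvSyn, h0]
    · simp only [h]
      exact ih

-- A's outer append-if fold = map over the filtered range
theorem pv_foldl_append_if (f : Int → Int) (q : Int → Bool) (l : List Int) (init : List Int) :
    l.foldl (fun b i => if q i then b ++ [f i] else b) init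
      = init ++ (l.filter q).map f := by
  induction l generalizing init with
  | nil => simp
  | cons i tl ih =>
    by_cases h : q i
    · simp [h, ih, List.append_assoc]
    · simp [h, ih]

-- B's one-pass fold over a map-shaped accumulator
theorem pv_b_fold (l : List (Int × Int)) (cbs : List Int) (g : Int → Int) :
    l.foldl
      (fun acc p =>
        (acc.zip cbs).map (fun q =>
          if PySem.Int.band (p.1 + 1) (q.2 + 1) == q.2 + 1 then PySem.Int.bxor q.1 p.2 else q.1))
      (cbs.map g)
      = cbs.map (fun cb => pvSyn cb l (g cb)) := by
  induction l generalizing g with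
  | nil => simp [pvSyn]
  | cons p tl ih =>
    simp only [List.foldl_cons]
    have hz : (cbs.map g).zip cbs = cbs.map (fun c => (g c, c)) := by
      have h' := @List.zip_map' Int Int Int g id cbs
      rw [List.map_id] at h'
      exact h'
    rw [hz, List.map_map]
    have : ((fun q : Int × Int =>
        if PySem.Int.band (p.1 + 1) (q.2 + 1) == q.2 + 1 then PySem.Int.bxor q.1 p.2 else q.1) ∘
        (fun c => (g c, c)))
        = fun c => if PySem.Int.band (p.1 + 1) (c + 1) == c + 1 then PySem.Int.bxor (g c) p.2 else g c := by
      funext c; rfl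
    rw [this, ih]
    apply List.map_congr_left
    intro c _
    simp only [pvSyn, List.foldl_cons]

-- the check-bit list B sorts = the reverse of A's filtered range
theorem pv_cbs_eq (code : List Int) (indexes_check_bits : List Int) :
    PySem.List.sorted
      (PySem.Set.ofList (indexes_check_bits.filter
        (fun cb => decide (0 ≤ cb) && decide (cb < (code.length : Int)))))
      (fun x => x) true
      = ((PySem.List.pyRange 0 (code.length : Int) 1).filter
          (fun i => indexes_check_bits.contains i)).reverse := by
  apply PySem.List.sorted_rev_eq_of_perm_of_pairwise_gt
  · -- permutation: both are nodup lists with the same membership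
    apply List.Perm.symm
    rw [List.perm_ext_iff_of_nodup (PySem.Set.nodup_ofList _)
      (List.nodup_reverse.mpr ((PySem.List.nodup_pyRange_one _ _).filter _))]
    intro x
    simp only [PySem.Set.mem_ofList, List.mem_filter, List.mem_reverse,
      PySem.List.mem_pyRange_one, Bool.and_eq_true, decide_eq_true_eq, List.contains_eq_mem]
    tauto
  · -- strictly decreasing
    rw [List.pairwise_reverse]
    exact ((PySem.List.pairwise_lt_pyRange_one 0 (code.length : Int)).filter _).imp (fun h => h)

-- ===== VERDICT (by name: the statement is the Claim_ definition above) =====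
theorem get_index_where_error_spec : Claim_equal_get_index_where_error := by
  intro code indexes_check_bits _
  unfold Spec_get_index_where_error get_index_where_error get_index_where_error_alt
  simp only []
  -- rewrite A's inner folds over the range as folds over enumerate code 0
  have hen : PySem.List.enumerate code 0
      = (PySem.List.pyRange 0 (code.length : Int) 1).map
          (fun j => (j, PySem.List.pyGetD code j 0)) :=
    PySem.List.enumerate_eq_map_pyRange code 0
  -- A = reverse (map pvSyn-from-code[cb] over filtered range)
  rw [pv_foldl_append_if
      (fun cb => ((PySem.List.pyRange 0 (code.length : Int) 1).foldl
        (fun (st : Bool × Int) index =>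
          if check_bits_included (index + 1) (cb + 1) then
            if st.1 then (true, PySem.Int.bxor st.2 (PySem.List.pyGetD code index 0))
            else (true, PySem.List.pyGetD code index 0)
          else st)
        (false, 0)).2)
      (fun i => indexes_check_bits.contains i)]
  rw [pv_cbs_eq code indexes_check_bits]
  rw [show (List.replicate (((PySem.List.pyRange 0 (code.length : Int) 1).filter
        (fun i => indexes_check_bits.contains i)).reverse).length (0 : Int))
      = (((PySem.List.pyRange 0 (code.length : Int) 1).filter
        (fun i => indexes_check_bits.contains i)).reverse).map (fun _ => (0 : Int)) by
      rw [List.map_const']]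
  rw [pv_b_fold (PySem.List.enumerate code 0) _ (fun _ => 0)]
  rw [List.nil_append, ← List.map_reverse]
  apply List.map_congr_left
  intro cb _
  -- one check bit: A's flag fold = pvSyn from 0
  have h1 : ((PySem.List.pyRange 0 (code.length : Int) 1).foldl
      (fun (st : Bool × Int) index =>
        if check_bits_included (index + 1) (cb + 1) then
          if st.1 then (true, PySem.Int.bxor st.2 (PySem.List.pyGetD code index 0))
          else (true, PySem.List.pyGetD code index 0)
        else st)
      (false, 0))
      = ((PySem.List.enumerate code 0).foldl
      (fun (st : Bool × Int) p =>
        if PySem.Int.band (p.1 + 1) (cb + 1) == cb + 1 then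
          if st.1 then (true, PySem.Int.bxor st.2 p.2) else (true, p.2)
        else st)
      (false, 0)) := by
    rw [hen, List.foldl_map]
    rfl
  rw [h1, pv_flag_false]
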